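-- pv_equiv track=rewrite | github.com/SUPERINTIALD/PerfectHouseFinder | testnlpDialoGPT.py | extract_school_info
-- ===== SOURCE A (Python) =====
-- def extract_school_info(dataset):
--     info = {}
--     for item in dataset:
--         if 'name' in item:
--             parts = item['name'].split(',')
--             if len(parts) > 1:
--                 location = parts[-1].strip().capitalize()
--                 school_name = parts[0].strip()
--                 if location in info:
--                     info[location].append(school_name)
--                 else:
--                     info[location] = [school_name]
--     return info
-- ===== SOURCE B (Python) =====
-- def extract_school_info(dataset):
--     # two-pass: extract flat (location, school_name) pairs, then group per distinct location
--     pairs = []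
--     for item in dataset:
--         if 'name' in item:
--             parts = item['name'].split(',')
--             if len(parts) > 1:
--                 pairs.append((parts[-1].strip().capitalize(), parts[0].strip()))
--     return {loc: [name for l, name in pairs if l == loc]
--             for loc in dict.fromkeys(loc for loc, _ in pairs)}
-- ===== Notes on version B (the rewrite author's own statement) =====
-- stated objective: alternative
-- what changed: Replaces the running dict accumulation with a two-pass extract-then-group: first build the flat (location, school_name) pair list, then build the result as {loc: names matching loc} over the deduplicated locations.
import Mathlib
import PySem

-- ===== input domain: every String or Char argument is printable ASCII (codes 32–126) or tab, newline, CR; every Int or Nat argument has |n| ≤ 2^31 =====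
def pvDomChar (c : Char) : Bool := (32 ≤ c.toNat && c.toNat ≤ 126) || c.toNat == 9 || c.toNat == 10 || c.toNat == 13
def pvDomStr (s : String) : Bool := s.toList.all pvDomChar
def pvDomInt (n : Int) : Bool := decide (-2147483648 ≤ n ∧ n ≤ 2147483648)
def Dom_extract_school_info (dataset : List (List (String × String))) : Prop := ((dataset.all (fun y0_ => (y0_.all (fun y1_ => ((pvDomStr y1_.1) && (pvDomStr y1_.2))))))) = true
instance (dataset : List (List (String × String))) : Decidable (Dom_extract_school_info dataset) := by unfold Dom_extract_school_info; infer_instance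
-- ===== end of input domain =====

-- B groups by a two-pass extract-then-group instead of A's running dict accumulation; return values are identical (objective: alternative).

-- shared helper: Python str.capitalize (exact on ASCII: first char uppercased, rest lowercased)
def pvCapitalize (s : String) : String :=
  match s.toList with
  | [] => ""
  | c :: rest => String.ofList (PySem.Chars.upperChar c :: PySem.Chars.lower rest)

-- shared helper: s.split(',') — total, the separator is nonempty so split? is never none
def pvSplit (s : String) : List String := (PySem.Str.split? s ",").getD []

-- ===== PORT A =====
def extract_school_info (dataset : List (List (String × String))) : List (String × List String) :=
  (dataset.foldl (fun (info : PySem.Dict String (List String)) item =>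
      match item.lookup "name" with
      | none => info
      | some nm =>
        let parts := pvSplit nm
        if parts.length > 1 then
          -- parts[-1] / parts[0] are total here: split never returns an empty list, so .getD "" is never taken
          let location := pvCapitalize (PySem.Str.strip ((PySem.List.pyGet? parts (-1)).getD ""))
          let school_name := PySem.Str.strip ((PySem.List.pyGet? parts 0).getD "")
          if info.contains location then
            info.insert location (info.getD location [] ++ [school_name])
          else
            info.insert location [school_name]
        else info)
    PySem.Dict.empty).items

-- ===== PORT B =====
-- B-side helper: the (location, school_name) pair an item contributes, if any
def pvPair? (item : List (String × String)) : Option (String × String) :=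
  match item.lookup "name" with
  | none => none
  | some nm =>
    let parts := pvSplit nm
    if parts.length > 1 then
      some (pvCapitalize (PySem.Str.strip ((PySem.List.pyGet? parts (-1)).getD "")),
            PySem.Str.strip ((PySem.List.pyGet? parts 0).getD ""))
    else none

def extract_school_info_alt (dataset : List (List (String × String))) : List (String × List String) :=
  let pairs := dataset.filterMap pvPair?
  (PySem.Set.ofList (pairs.map (·.1))).map
    (fun loc => (loc, (pairs.filter (fun p => p.1 == loc)).map (·.2)))

-- ===== PRECONDITION & SPEC =====
def Spec_extract_school_info (dataset : List (List (String × String))) (out : List (String × List String)) : Prop := out = extract_school_info_alt dataset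
instance (dataset : List (List (String × String))) (out : List (String × List String)) : Decidable (Spec_extract_school_info dataset out) := by unfold Spec_extract_school_info; infer_instance

-- ===== CLAIM (what is proved, stated in full; the proofs are below) =====
def Claim_equal_extract_school_info : Prop := ∀ (dataset : List (List (String × String))), Dom_extract_school_info dataset → Spec_extract_school_info dataset (extract_school_info dataset)

-- ===== LEMMAS AND PROOFS =====

-- A's loop body is 'modify' at the key of pvPair? (or no-op)
lemma pvStep_eq (info : PySem.Dict String (List String)) (item : List (String × String)) :
    (match item.lookup "name" with
      | none => info
      | some nm =>
        let parts := pvSplit nm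
        if parts.length > 1 then
          let location := pvCapitalize (PySem.Str.strip ((PySem.List.pyGet? parts (-1)).getD ""))
          let school_name := PySem.Str.strip ((PySem.List.pyGet? parts 0).getD "")
          if info.contains location then
            info.insert location (info.getD location [] ++ [school_name])
          else
            info.insert location [school_name]
        else info) =
    (match pvPair? item with
      | none => info
      | some p => info.modify p.1 [] (· ++ [p.2])) := by
  unfold pvPair?
  cases item.lookup "name" with
  | none => rfl
  | some nm =>
    by_cases h : (pvSplit nm).length > 1
    · simp only [if_pos h]
      by_cases hc : info.contains (pvCapitalize (PySem.Str.strip ((PySem.List.pyGet? (pvSplit nm) (-1)).getD "")))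
      · rw [if_pos hc]; rfl
      · rw [if_neg hc, PySem.Dict.modify,
            PySem.Dict.getD_of_not_contains info [] (by simpa using hc), List.nil_append]
    · simp only [if_neg h]

-- A's fold over dataset equals the fold of the modify-step over the extracted pairs
lemma pvFold_eq (dataset : List (List (String × String))) (d : PySem.Dict String (List String)) :
    dataset.foldl (fun (info : PySem.Dict String (List String)) item =>
      match item.lookup "name" with
      | none => info
      | some nm =>
        let parts := pvSplit nm
        if parts.length > 1 then
          let location := pvCapitalize (PySem.Str.strip ((PySem.List.pyGet? parts (-1)).getD ""))
          let school_name := PySem.Str.strip ((PySem.List.pyGet? parts 0).getD "")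
          if info.contains location then
            info.insert location (info.getD location [] ++ [school_name])
          else
            info.insert location [school_name]
        else info) d =
    (dataset.filterMap pvPair?).foldl (fun info p => info.modify p.1 [] (· ++ [p.2])) d := by
  induction dataset generalizing d with
  | nil => rfl
  | cons item rest ih =>
    rw [List.foldl_cons, pvStep_eq d item, List.filterMap_cons]
    cases pvPair? item with
    | none => exact ih d
    | some p => simpa using ih (d.modify p.1 [] (· ++ [p.2]))

-- ===== VERDICT (by name: the statement is the Claim_ definition above) =====
theorem extract_school_info_spec : Claim_equal_extract_school_info := by
  intro dataset _
  unfold Spec_extract_school_info extract_school_info extract_school_info_alt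
  rw [pvFold_eq]
  set pairs := dataset.filterMap pvPair? with hpairs
  set d := pairs.foldl (fun (info : PySem.Dict String (List String)) p => info.modify p.1 [] (· ++ [p.2])) PySem.Dict.empty with hd
  have hkeys : d.keys = PySem.Set.ofList (pairs.map (·.1)) := by
    rw [hd, PySem.Dict.keys_foldl_modify_key]
    simp [PySem.Set.update_nil_left]
  have hnd : d.keys.Nodup := by
    rw [hkeys]; exact PySem.Set.nodup_ofList _
  rw [PySem.Dict.items_eq_map_keys d hnd [], hkeys]
  refine List.map_congr_left ?_
  intro loc _
  have := PySem.Dict.getD_foldl_modify_append (l := pairs) (d := PySem.Dict.empty) (c := loc)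
  rw [← hd] at this
  simp [this]
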